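-- pv_equiv track=rewrite | github.com/muhammadsaad2000/Comp254MS | Lab02/Ex1.py | example5
-- ===== SOURCE A (Python) =====
-- def example5(first, second):
--     n = len(first)     # length of arrays first and second
--     count = 0          # Initialize count to store the number of occurrences
--     for i in range(n):             # Outer loop: Iterate through i from 0 to n-1
--         total = 0                   # Initialize total to store the sum of elements from first
--         for j in range(n):         # Middle loop: Iterate index j from 0 to n-1
--             for k in range(j + 1):  # Inner loop: Iterate k from 0 to j
--                 total += first[k]    # Add elements to k from first to the total
--         if second[i] == total:      # Check if the current element in second is equal to the calculated total
--             count += 1               # If true, increment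
--     return count  #
-- ===== SOURCE B (Python) =====
-- def example5(first, second):
--     n = len(first)
--     total = sum(v * (n - k) for k, v in enumerate(first))
--     return sum(1 for x in second[:n] if x == total)
-- ===== Notes on version B (the rewrite author's own statement) =====
-- stated objective: faster
-- what changed: Replaced A's cubic triangular triple loop (recomputed for every i) by the closed-form weighted sum total = sum(first[k]*(n-k)) computed once, then a single counting pass over second[:n].
import Mathlib
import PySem

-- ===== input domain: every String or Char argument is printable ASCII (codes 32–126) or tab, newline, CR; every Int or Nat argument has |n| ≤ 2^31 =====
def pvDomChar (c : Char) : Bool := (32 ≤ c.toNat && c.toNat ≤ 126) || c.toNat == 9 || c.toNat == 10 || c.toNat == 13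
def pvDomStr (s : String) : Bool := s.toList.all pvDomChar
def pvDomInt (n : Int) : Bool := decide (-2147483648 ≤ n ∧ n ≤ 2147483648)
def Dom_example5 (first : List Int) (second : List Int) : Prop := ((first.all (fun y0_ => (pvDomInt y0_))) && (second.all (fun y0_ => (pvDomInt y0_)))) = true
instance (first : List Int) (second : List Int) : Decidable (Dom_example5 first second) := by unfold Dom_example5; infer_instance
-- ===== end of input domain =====

-- B replaces A's cubic triangular triple loop by a one-pass closed-form weighted sum
-- total = Σ first[k]·(n−k) and a single counting pass over second[:n] (objective: faster).

-- ===== PORT A =====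
def example5 (first : List Int) (second : List Int) : Int :=
  let n : Int := (first.length : Int)
  (PySem.List.pyRange 0 n 1).foldl
    (fun count i =>
      let total : Int :=
        (PySem.List.pyRange 0 n 1).foldl
          (fun t j =>
            (PySem.List.pyRange 0 (j + 1) 1).foldl
              (fun t2 k => t2 + PySem.List.pyGetD first k 0) t) 0
      if PySem.List.pyGetD second i 0 = total then count + 1 else count) 0

-- ===== PORT B =====
def example5_alt (first : List Int) (second : List Int) : Int :=
  let n : Int := (first.length : Int)
  let total : Int :=
    (PySem.List.enumerate first 0).foldl (fun t kv => t + kv.2 * (n - kv.1)) 0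
  (PySem.List.slice second none (some n)).foldl
    (fun c x => if x = total then c + 1 else c) 0

-- ===== PRECONDITION & SPEC =====
-- Pre_ excludes exactly the inputs on which A raises IndexError (second shorter than first).
def Pre_example5 (first : List Int) (second : List Int) : Prop :=
  first.length ≤ second.length
instance (first : List Int) (second : List Int) : Decidable (Pre_example5 first second) := by
  unfold Pre_example5; infer_instance

def pvWitness_example5 : List Int × List Int := ([1, 2, 3], [9, 14, 5])

def Spec_example5 (first : List Int) (second : List Int) (out : Int) : Prop :=
  out = example5_alt first second
instance (first : List Int) (second : List Int) (out : Int) : Decidable (Spec_example5 first second out) := by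
  unfold Spec_example5; infer_instance

-- ===== CLAIM (what is proved, stated in full; the proofs are below) =====
def Claim_equal_example5 : Prop := ∀ (first : List Int) (second : List Int), Dom_example5 first second → Pre_example5 first second → Spec_example5 first second (example5 first second)

-- ===== LEMMAS AND PROOFS =====

-- the triangular double sum equals the weighted single sum
theorem pv_tri (g : Nat → Int) : ∀ (m : Nat),
    (∑ j ∈ Finset.range m, ∑ k ∈ Finset.range (j + 1), g k)
      = ∑ k ∈ Finset.range m, ((m - k : Nat) : Int) * g k := by
  intro m
  induction m with
  | zero => simp
  | succ m ih =>
      rw [Finset.sum_range_succ, ih]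
      have hco : (∑ k ∈ Finset.range (m + 1), ((m + 1 - k : Nat) : Int) * g k)
          = ∑ k ∈ Finset.range (m + 1), (((m - k : Nat) : Int) * g k + g k) := by
        refine Finset.sum_congr rfl ?_
        intro k hk
        have hk' : k < m + 1 := Finset.mem_range.mp hk
        have : ((m + 1 - k : Nat) : Int) = ((m - k : Nat) : Int) + 1 := by omega
        rw [this]; ring
      rw [hco, Finset.sum_add_distrib, Finset.sum_range_succ (fun k => ((m - k : Nat) : Int) * g k)]
      simp

-- inner loop of A: prefix sum
theorem pv_inner (f : List Int) : ∀ (m : Nat) (t : Int),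
    (PySem.List.pyRange 0 (m : Int) 1).foldl (fun t2 k => t2 + PySem.List.pyGetD f k 0) t
      = t + ∑ k ∈ Finset.range m, f.getD k 0 := by
  intro m
  induction m with
  | zero => intro t; simp [PySem.List.pyRange_one_eq_nil]
  | succ m ih =>
      intro t
      have : ((m + 1 : Nat) : Int) = (m : Int) + 1 := by push_cast; ring
      rw [this, PySem.List.pyRange_one_succ_right (by positivity), List.foldl_append, ih]
      simp [Finset.sum_range_succ]
      ring

-- middle loop of A: sum of prefix sums
theorem pv_middle (f : List Int) : ∀ (m : Nat) (t0 : Int),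
    (PySem.List.pyRange 0 (m : Int) 1).foldl
        (fun t j => (PySem.List.pyRange 0 (j + 1) 1).foldl
          (fun t2 k => t2 + PySem.List.pyGetD f k 0) t) t0
      = t0 + ∑ j ∈ Finset.range m, ∑ k ∈ Finset.range (j + 1), f.getD k 0 := by
  intro m
  induction m with
  | zero => intro t0; simp [PySem.List.pyRange_one_eq_nil]
  | succ m ih =>
      intro t0
      have hm : ((m + 1 : Nat) : Int) = (m : Int) + 1 := by push_cast; ring
      rw [hm, PySem.List.pyRange_one_succ_right (by positivity), List.foldl_append, ih]
      have : ((m : Int) + 1) = ((m + 1 : Nat) : Int) := by push_cast; ring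
      simp only [List.foldl_cons, List.foldl_nil, this, pv_inner]
      rw [Finset.sum_range_succ (fun j => ∑ k ∈ Finset.range (j + 1), f.getD k 0) m]
      ring

-- B's total as a weighted Finset sum
theorem pv_alt_total (f : List Int) (n : Int) : ∀ (s : Nat) (t : Int),
    (PySem.List.enumerate f (s : Int)).foldl (fun t kv => t + kv.2 * (n - kv.1)) t
      = t + ∑ k ∈ Finset.range f.length, f.getD k 0 * (n - ((s + k : Nat) : Int)) := by
  induction f with
  | nil => intro s t; simp [PySem.List.enumerate_nil]
  | cons x xs ih =>
      intro s t
      rw [PySem.List.enumerate_cons, List.foldl_cons]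
      have hs : (s : Int) + 1 = ((s + 1 : Nat) : Int) := by push_cast; ring
      rw [hs, ih (s + 1)]
      simp only [List.length_cons]
      rw [Finset.sum_range_succ']
      simp only [List.getD_cons_succ, List.getD_cons_zero]
      have : ∀ k : Nat, ((s + 1 + k : Nat) : Int) = ((s + (k + 1) : Nat) : Int) := by
        intro k; push_cast; ring
      simp only [this]
      push_cast
      ring

-- counting loop over indices equals counting over take, when m ≤ length
theorem pv_count (xs : List Int) (total : Int) : ∀ (m : Nat), m ≤ xs.length → ∀ (c0 : Int),
    (PySem.List.pyRange 0 (m : Int) 1).foldl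
        (fun c i => if PySem.List.pyGetD xs i 0 = total then c + 1 else c) c0
      = (xs.take m).foldl (fun c x => if x = total then c + 1 else c) c0 := by
  intro m
  induction m with
  | zero => intro _ c0; simp [PySem.List.pyRange_one_eq_nil]
  | succ m ih =>
      intro hm c0
      have hm' : m ≤ xs.length := Nat.le_of_succ_le hm
      have hcast : ((m + 1 : Nat) : Int) = (m : Int) + 1 := by push_cast; ring
      rw [hcast, PySem.List.pyRange_one_succ_right (by positivity), List.foldl_append,
        ih hm' c0]
      have hlt : m < xs.length := hm
      have htake : xs.take (m + 1) = xs.take m ++ [xs[m]] := by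
        rw [List.take_add_one, List.getElem?_eq_getElem hlt]; simp
      rw [htake, List.foldl_append]
      simp [PySem.List.pyGetD_natCast, List.getD, List.getElem?_eq_getElem hlt]

-- ===== VERDICT (by name: the statement is the Claim_ definition above) =====
theorem example5_spec : Claim_equal_example5 := by
  intro first second _ hpre
  unfold Spec_example5 example5 example5_alt
  simp only []
  have hn : ((first.length : Nat) : Int) = (first.length : Int) := rfl
  -- rewrite A's total
  rw [pv_middle first first.length 0]
  -- rewrite B's total
  have hb := pv_alt_total first (first.length : Int) 0 0
  simp only [Nat.cast_zero] at hb
  rw [hb]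
  have hzero : ∀ k : Nat, ((0 + k : Nat) : Int) = (k : Int) := by intro k; push_cast; ring
  simp only [hzero] at hb ⊢
  -- totals equal
  have htot : (0 : Int) + ∑ j ∈ Finset.range first.length, ∑ k ∈ Finset.range (j + 1), first.getD k 0
      = 0 + ∑ k ∈ Finset.range first.length, first.getD k 0 * ((first.length : Int) - (k : Int)) := by
    rw [pv_tri]
    congr 1
    refine Finset.sum_congr rfl ?_
    intro k hk
    have hk' : k < first.length := Finset.mem_range.mp hk
    have : ((first.length - k : Nat) : Int) = (first.length : Int) - (k : Int) := by omega
    rw [this]; ring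
  rw [htot]
  -- counting loop
  rw [pv_count second _ first.length hpre 0, PySem.List.slice_to_natCast]
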